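-- pv_equiv track=rewrite | github.com/FangmingXie/methylscores | .ipynb_checkpoints/02.compute_scores-checkpoint.py | process_strings
-- ===== SOURCE A (Python) =====
-- def process_strings(strings, consider_pairedend=True):
--     """Process strings
--     split mCH and mCG
--     z Z - mCG
--     x X - mCHG, h H - mCHH
--     u U - mCN
--     . not C
--     , read deliminator
--     ; paired end read deliminator
--
--     consider_pairedend - True: combine paired end reads as 1 fragment
--                        - False: consider them as 2 separate single-end reads
--
--     return: hH list/zZ list
--     """
--     if consider_pairedend:
--         strings = (strings.replace('.', '')
--                           .replace('u', '')
--                           .replace('x', 'h')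
--                           .replace('X', 'H')
--                           .replace(';', '') # consider paired-end reads are linked
--                    )
--     else:
--         strings = (strings.replace('.', '')
--                           .replace('u', '')
--                           .replace('x', 'h')
--                           .replace('X', 'H')
--                           .replace(';', ',') # consider paired-end reads are separate
--                    )
--
--     # z Z h H
--     string_list_mch = (strings.replace('z', '')
--                              .replace('Z', '')
--                              .split(',')
--                       )
--     string_list_mcg = (strings.replace('h', '')
--                              .replace('H', '')
--                              .split(',')
--                       )
--
--     # remove empty entries
--     string_list_mch = [string for string in string_list_mch if string]
--     string_list_mcg = [string for string in string_list_mcg if string]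
--     return string_list_mch, string_list_mcg
-- ===== SOURCE B (Python) =====
-- def process_strings(strings, consider_pairedend=True):
--     mch, mcg = [], []
--     cur_h, cur_g = [], []
--
--     def flush():
--         if cur_h:
--             mch.append(''.join(cur_h))
--             cur_h.clear()
--         if cur_g:
--             mcg.append(''.join(cur_g))
--             cur_g.clear()
--
--     for c in strings:
--         if c == '.' or c == 'u':
--             continue
--         if c == ';':
--             if consider_pairedend:
--                 continue
--             c = ','
--         if c == ',':
--             flush()
--         elif c == 'x':
--             cur_h.append('h')
--         elif c == 'X':
--             cur_h.append('H')
--         elif c == 'h' or c == 'H':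
--             cur_h.append(c)
--         elif c == 'z' or c == 'Z':
--             cur_g.append(c)
--         else:
--             cur_h.append(c)
--             cur_g.append(c)
--     flush()
--     return mch, mcg
-- ===== Notes on version B (the rewrite author's own statement) =====
-- stated objective: alternative
-- what changed: A makes eight whole-string replace passes plus two split passes and two filter passes; B is a single left-to-right scan maintaining the current mCH/mCG segments and flushing them at each delimiter.
import Mathlib
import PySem

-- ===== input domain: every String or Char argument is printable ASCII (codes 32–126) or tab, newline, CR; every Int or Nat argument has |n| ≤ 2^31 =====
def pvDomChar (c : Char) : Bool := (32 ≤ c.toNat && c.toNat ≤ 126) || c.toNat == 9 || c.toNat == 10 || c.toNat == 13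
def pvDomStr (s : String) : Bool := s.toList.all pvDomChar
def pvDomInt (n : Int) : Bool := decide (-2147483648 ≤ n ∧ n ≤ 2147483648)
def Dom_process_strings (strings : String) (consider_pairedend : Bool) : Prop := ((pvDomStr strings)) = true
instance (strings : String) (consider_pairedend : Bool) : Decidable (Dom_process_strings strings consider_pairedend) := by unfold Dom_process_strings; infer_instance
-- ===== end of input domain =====

-- B replaces A's eight whole-string replace passes and two split passes by ONE left-to-right
-- scan that maintains the current mCH/mCG segments and flushes them at each delimiter
-- (objective: alternative single-pass decomposition; same result, proved equal below).

-- ===== PORT A =====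
def process_strings (strings : String) (consider_pairedend : Bool) : List String × List String :=
  let s :=
    if consider_pairedend then
      PySem.Str.replace (PySem.Str.replace (PySem.Str.replace (PySem.Str.replace
        (PySem.Str.replace strings "." "") "u" "") "x" "h") "X" "H") ";" ""
    else
      PySem.Str.replace (PySem.Str.replace (PySem.Str.replace (PySem.Str.replace
        (PySem.Str.replace strings "." "") "u" "") "x" "h") "X" "H") ";" ","
  let string_list_mch :=
    (PySem.Chars.splitOn (PySem.Str.replace (PySem.Str.replace s "z" "") "Z" "").toList [',']).map String.ofList
  let string_list_mcg :=
    (PySem.Chars.splitOn (PySem.Str.replace (PySem.Str.replace s "h" "") "H" "").toList [',']).map String.ofList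
  (string_list_mch.filter (fun str => str ≠ ""), string_list_mcg.filter (fun str => str ≠ ""))

-- ===== PORT B =====
-- state = (mch, mcg, cur_h, cur_g)
def pvFlush (st : List String × List String × List Char × List Char) :
    List String × List String × List Char × List Char :=
  ((if st.2.2.1 ≠ [] then st.1 ++ [String.ofList st.2.2.1] else st.1),
   (if st.2.2.2 ≠ [] then st.2.1 ++ [String.ofList st.2.2.2] else st.2.1), [], [])

def pvStepB (consider_pairedend : Bool)
    (st : List String × List String × List Char × List Char) (c : Char) :
    List String × List String × List Char × List Char :=
  if c = '.' ∨ c = 'u' then st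
  else if c = ';' then (if consider_pairedend then st else pvFlush st)
  else if c = ',' then pvFlush st
  else if c = 'x' then (st.1, st.2.1, st.2.2.1 ++ ['h'], st.2.2.2)
  else if c = 'X' then (st.1, st.2.1, st.2.2.1 ++ ['H'], st.2.2.2)
  else if c = 'h' ∨ c = 'H' then (st.1, st.2.1, st.2.2.1 ++ [c], st.2.2.2)
  else if c = 'z' ∨ c = 'Z' then (st.1, st.2.1, st.2.2.1, st.2.2.2 ++ [c])
  else (st.1, st.2.1, st.2.2.1 ++ [c], st.2.2.2 ++ [c])

def process_strings_alt (strings : String) (consider_pairedend : Bool) : List String × List String :=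
  let st := pvFlush (strings.toList.foldl (pvStepB consider_pairedend) ([], [], [], []))
  (st.1, st.2.1)

-- ===== PRECONDITION & SPEC =====
def Spec_process_strings (strings : String) (consider_pairedend : Bool) (out : List String × List String) : Prop := out = process_strings_alt strings consider_pairedend
instance (strings : String) (consider_pairedend : Bool) (out : List String × List String) : Decidable (Spec_process_strings strings consider_pairedend out) := by unfold Spec_process_strings; infer_instance

-- ===== CLAIM (what is proved, stated in full; the proofs are below) =====
def Claim_equal_process_strings : Prop := ∀ (strings : String) (consider_pairedend : Bool), Dom_process_strings strings consider_pairedend → Spec_process_strings strings consider_pairedend (process_strings strings consider_pairedend)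

-- ===== LEMMAS AND PROOFS =====

-- single-character replace is a flatMap
theorem rep_go_eq (o : Char) (r : List Char) :
    ∀ (l : List Char) (fuel : Nat) (acc : List Char), l.length ≤ fuel →
      PySem.Chars.replace.go [o] r fuel l acc =
        acc.reverse ++ l.flatMap (fun c => if c = o then r else [c]) := by
  intro l
  induction l with
  | nil =>
    intro fuel acc _
    cases fuel <;> rw [PySem.Chars.replace.go] <;> simp
  | cons c t ih =>
    intro fuel acc h
    have h' : t.length ≤ fuel - 1 := by simp at h; omega
    cases fuel with
    | zero => simp at h
    | succ fuel =>
      rw [PySem.Chars.replace.go]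
      have hpre : [o].isPrefixOf (c :: t) = (o == c) := by simp [List.isPrefixOf]
      by_cases hc : c = o
      · subst hc
        simp only [hpre, beq_self_eq_true, if_true]
        have hd : List.drop [c].length (c :: t) = t := rfl
        rw [hd, ih _ _ (by simpa using h')]
        simp
      · have hb : (o == c) = false := by simp [beq_eq_false_iff_ne]; exact fun h2 => hc h2.symm
        simp only [hpre, hb, Bool.false_eq_true, if_false]
        rw [ih _ _ (by simpa using h')]
        simp [hc]

theorem replace_single (s : List Char) (o : Char) (r : List Char) :
    PySem.Chars.replace s [o] r = s.flatMap (fun c => if c = o then r else [c]) := by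
  rw [PySem.Chars.replace]
  simp only [List.isEmpty_cons, if_false, Bool.false_eq_true]
  exact rep_go_eq o r s s.length [] le_rfl

-- split on a single comma, forward-accumulator form
def splitF : List Char → List Char → List (List Char)
  | [], cur => [cur]
  | c :: t, cur => if c = ',' then cur :: splitF t [] else splitF t (cur ++ [c])

theorem splitOn_go_eq :
    ∀ (l : List Char) (fuel : Nat) (cur : List Char) (acc : List (List Char)),
      l.length < fuel →
      PySem.Chars.splitOn.go [','] fuel l cur acc = acc.reverse ++ splitF l cur.reverse := by
  intro l
  induction l with
  | nil =>
    intro fuel cur acc h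
    cases fuel with
    | zero => omega
    | succ fuel =>
      rw [PySem.Chars.splitOn.go]
      simp [splitF]
      omega
  | cons c t ih =>
    intro fuel cur acc h
    cases fuel with
    | zero => omega
    | succ fuel =>
      rw [PySem.Chars.splitOn.go]
      have hpre : [','].isPrefixOf (c :: t) = (',' == c) := by simp [List.isPrefixOf]
      by_cases hc : c = ','
      · subst hc
        simp only [hpre, beq_self_eq_true, if_true]
        have hd : List.drop [','].length (',' :: t) = t := rfl
        rw [hd, ih _ _ _ (by simp at h ⊢; omega)]
        simp [splitF]
      · have : (',' == c) = false := by simp [beq_eq_false_iff_ne]; exact fun h' => hc h'.symm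
        simp only [hpre, this, if_false]
        rw [ih _ _ _ (by simp at h ⊢; omega)]
        simp [splitF, hc]

theorem splitOn_single (s : List Char) :
    PySem.Chars.splitOn s [','] = splitF s [] := by
  rw [PySem.Chars.splitOn]
  have := splitOn_go_eq s (s.length + 1) [] [] (by omega)
  simpa using this

-- the per-character effect of A's first five replace passes
def gmap (consider_pairedend : Bool) (c : Char) : Option Char :=
  if c = '.' then none
  else if c = 'u' then none
  else if c = 'x' then some 'h'
  else if c = 'X' then some 'H'
  else if c = ';' then (if consider_pairedend then none else some ',')
  else some c

def pH (c : Char) : Bool := !(c == 'z' || c == 'Z')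
def pG (c : Char) : Bool := !(c == 'h' || c == 'H')

theorem chain_eq (pe : Bool) (L : List Char) :
    PySem.Chars.replace (PySem.Chars.replace (PySem.Chars.replace (PySem.Chars.replace
      (PySem.Chars.replace L ['.'] []) ['u'] []) ['x'] ['h']) ['X'] ['H']) [';']
      (if pe then [] else [',']) = L.filterMap (gmap pe) := by
  simp only [replace_single]
  induction L with
  | nil => simp
  | cons c t ih =>
    simp only [List.flatMap_cons, List.flatMap_append, List.filterMap_cons, ih]
    by_cases h1 : c = '.'
    · simp [h1, gmap]
    by_cases h2 : c = 'u'
    · simp [h2, gmap]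
    by_cases h3 : c = 'x'
    · simp [h3, gmap]
    by_cases h4 : c = 'X'
    · simp [h4, gmap]
    by_cases h5 : c = ';'
    · cases pe <;> simp [h5, h1, h2, h3, h4, gmap]
    · simp [h1, h2, h3, h4, h5, gmap]

theorem zfilter_eq (M : List Char) :
    PySem.Chars.replace (PySem.Chars.replace M ['z'] []) ['Z'] [] = M.filter pH := by
  simp only [replace_single]
  induction M with
  | nil => simp
  | cons c t ih =>
    simp only [List.flatMap_cons, List.flatMap_append, List.filter_cons, ih]
    by_cases h1 : c = 'z'
    · simp [h1, pH]
    by_cases h2 : c = 'Z'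
    · simp [h2, pH]
    · simp [h1, h2, pH]

theorem hfilter_eq (M : List Char) :
    PySem.Chars.replace (PySem.Chars.replace M ['h'] []) ['H'] [] = M.filter pG := by
  simp only [replace_single]
  induction M with
  | nil => simp
  | cons c t ih =>
    simp only [List.flatMap_cons, List.flatMap_append, List.filter_cons, ih]
    by_cases h1 : c = 'h'
    · simp [h1, pG]
    by_cases h2 : c = 'H'
    · simp [h2, pG]
    · simp [h1, h2, pG]

-- B's step after the drop/translate of gmap
def pvStep' (st : List String × List String × List Char × List Char) (c : Char) :
    List String × List String × List Char × List Char :=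
  if c = ',' then pvFlush st
  else if c = 'h' ∨ c = 'H' then (st.1, st.2.1, st.2.2.1 ++ [c], st.2.2.2)
  else if c = 'z' ∨ c = 'Z' then (st.1, st.2.1, st.2.2.1, st.2.2.2 ++ [c])
  else (st.1, st.2.1, st.2.2.1 ++ [c], st.2.2.2 ++ [c])

theorem stepB_factor (pe : Bool) (st : List String × List String × List Char × List Char) (c : Char) :
    pvStepB pe st c = (gmap pe c).elim st (pvStep' st) := by
  by_cases h1 : c = '.'
  · simp [pvStepB, gmap, h1]
  by_cases h2 : c = 'u'
  · simp [pvStepB, gmap, h2]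
  by_cases h3 : c = ';'
  · cases pe <;> simp [pvStepB, gmap, pvStep', h1, h2, h3]
  by_cases h4 : c = ','
  · simp [pvStepB, gmap, pvStep', h1, h2, h3, h4]
  by_cases h5 : c = 'x'
  · simp [pvStepB, gmap, pvStep', h1, h2, h3, h4, h5]
  by_cases h6 : c = 'X'
  · simp [pvStepB, gmap, pvStep', h1, h2, h3, h4, h5, h6]
  by_cases h7 : c = 'h' ∨ c = 'H'
  · simp [pvStepB, gmap, pvStep', h1, h2, h3, h4, h5, h6, h7]
  by_cases h8 : c = 'z' ∨ c = 'Z'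
  · simp [pvStepB, gmap, pvStep', h1, h2, h3, h4, h5, h6, h7, h8]
  · simp [pvStepB, gmap, pvStep', h1, h2, h3, h4, h5, h6, h7, h8]

theorem foldl_filterMap {α β σ : Type} (g : α → Option β) (step : σ → α → σ) (step' : σ → β → σ)
    (h : ∀ st a, step st a = (g a).elim st (step' st)) :
    ∀ (L : List α) (st : σ), L.foldl step st = (L.filterMap g).foldl step' st := by
  intro L
  induction L with
  | nil => intro st; rfl
  | cons a t ih =>
    intro st
    simp only [List.foldl_cons, List.filterMap_cons, h]
    cases g a <;> simp [ih]

theorem main_scan :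
    ∀ (t : List Char) (mch mcg : List String) (curH curG : List Char),
      pvFlush (t.foldl pvStep' (mch, mcg, curH, curG)) =
        (mch ++ ((splitF (t.filter pH) curH).map String.ofList).filter (fun s => s ≠ ""),
         mcg ++ ((splitF (t.filter pG) curG).map String.ofList).filter (fun s => s ≠ ""),
         [], []) := by
  intro t
  induction t with
  | nil =>
    intro mch mcg curH curG
    simp only [List.foldl_nil, List.filter_nil, splitF, List.map_cons, List.map_nil,
      List.filter_cons, List.filter_nil, pvFlush]
    by_cases hH : curH = [] <;> by_cases hG : curG = [] <;>
      simp [hH, hG, String.ofList_eq_empty_iff]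
  | cons c t ih =>
    intro mch mcg curH curG
    simp only [List.foldl_cons]
    by_cases hc : c = ','
    · subst hc
      have hstep : pvStep' (mch, mcg, curH, curG) ',' =
          ((if curH ≠ [] then mch ++ [String.ofList curH] else mch),
           (if curG ≠ [] then mcg ++ [String.ofList curG] else mcg), [], []) := rfl
      rw [hstep, ih]
      simp only [List.filter_cons, show pH ',' = true from rfl, show pG ',' = true from rfl,
        if_true, splitF, List.map_cons, List.filter_cons]
      by_cases hH : curH = [] <;> by_cases hG : curG = [] <;>
        simp [hH, hG, String.ofList_eq_empty_iff]
    by_cases hh : c = 'h' ∨ c = 'H'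
    · have hstep : pvStep' (mch, mcg, curH, curG) c = (mch, mcg, curH ++ [c], curG) := by
        simp [pvStep', hc, hh]
      have hpH : pH c = true := by rcases hh with h | h <;> simp [h, pH]
      have hpG : pG c = false := by rcases hh with h | h <;> simp [h, pG]
      rw [hstep, ih]
      simp [hpH, hpG, splitF, hc]
    by_cases hz : c = 'z' ∨ c = 'Z'
    · have hstep : pvStep' (mch, mcg, curH, curG) c = (mch, mcg, curH, curG ++ [c]) := by
        simp [pvStep', hc, hh, hz]
      have hpH : pH c = false := by rcases hz with h | h <;> simp [h, pH]
      have hpG : pG c = true := by rcases hz with h | h <;> simp [h, pG]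
      rw [hstep, ih]
      simp [hpH, hpG, splitF, hc]
    · have hstep : pvStep' (mch, mcg, curH, curG) c = (mch, mcg, curH ++ [c], curG ++ [c]) := by
        simp [pvStep', hc, hh, hz]
      have hpH : pH c = true := by
        simp [pH]; constructor <;> intro h <;> exact hz (by simp [h])
      have hpG : pG c = true := by
        simp [pG]; constructor <;> intro h <;> exact hh (by simp [h])
      rw [hstep, ih]
      simp [hpH, hpG, splitF, hc]

theorem A_eq (strings : String) (pe : Bool) :
    process_strings strings pe =
      (((splitF ((strings.toList.filterMap (gmap pe)).filter pH) []).map String.ofList).filter (fun s => s ≠ ""),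
       ((splitF ((strings.toList.filterMap (gmap pe)).filter pG) []).map String.ofList).filter (fun s => s ≠ "")) := by
  unfold process_strings
  cases pe with
  | false =>
    simp only [Bool.false_eq_true, if_false, PySem.Str.toList_replace,
      show ".".toList = ['.'] from rfl, show "".toList = ([] : List Char) from rfl,
      show "u".toList = ['u'] from rfl, show "x".toList = ['x'] from rfl,
      show "h".toList = ['h'] from rfl, show "X".toList = ['X'] from rfl,
      show "H".toList = ['H'] from rfl, show ";".toList = [';'] from rfl,
      show ",".toList = [','] from rfl, show "z".toList = ['z'] from rfl,
      show "Z".toList = ['Z'] from rfl]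
    have hch := chain_eq false strings.toList
    simp only [Bool.false_eq_true, if_false] at hch
    rw [hch, zfilter_eq, hfilter_eq, splitOn_single, splitOn_single]
  | true =>
    simp only [if_true, PySem.Str.toList_replace,
      show ".".toList = ['.'] from rfl, show "".toList = ([] : List Char) from rfl,
      show "u".toList = ['u'] from rfl, show "x".toList = ['x'] from rfl,
      show "h".toList = ['h'] from rfl, show "X".toList = ['X'] from rfl,
      show "H".toList = ['H'] from rfl, show ";".toList = [';'] from rfl,
      show "z".toList = ['z'] from rfl, show "Z".toList = ['Z'] from rfl]
    have hch := chain_eq true strings.toList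
    simp only [if_true] at hch
    rw [hch, zfilter_eq, hfilter_eq, splitOn_single, splitOn_single]

theorem alt_eq (strings : String) (pe : Bool) :
    process_strings_alt strings pe =
      (((splitF ((strings.toList.filterMap (gmap pe)).filter pH) []).map String.ofList).filter (fun s => s ≠ ""),
       ((splitF ((strings.toList.filterMap (gmap pe)).filter pG) []).map String.ofList).filter (fun s => s ≠ "")) := by
  unfold process_strings_alt
  rw [foldl_filterMap (gmap pe) (pvStepB pe) pvStep' (stepB_factor pe), main_scan]
  simp

-- ===== VERDICT (by name: the statement is the Claim_ definition above) =====
theorem process_strings_spec : Claim_equal_process_strings := by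
  unfold Claim_equal_process_strings
  intro strings pe _
  unfold Spec_process_strings
  rw [A_eq, alt_eq]
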